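-- pv_equiv track=rewrite | github.com/gittobey/Betty | betty-ws loop.py | extract_eid_and_start
-- ===== SOURCE A (Python) =====
-- def extract_eid_and_start(payload: str) -> tuple[str, str]:
--     eid = None
--     start = None
--     for part in payload.split(";"):
--         if part.startswith("eid="):
--             eid = part.split("=")[1]
--         elif part.startswith("start="):
--             start = part.split("=")[1]
--     return eid, start
-- ===== SOURCE B (Python) =====
-- def extract_eid_and_start(payload: str) -> tuple[str, str]:
--     fields = {}
--     for part in payload.split(";"):
--         pieces = part.split("=")
--         if len(pieces) >= 2:
--             fields[pieces[0]] = pieces[1]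
--     return fields.get("eid"), fields.get("start")
-- ===== Notes on version B (the rewrite author's own statement) =====
-- stated objective: idiomatic
-- what changed: B replaces A's per-key startswith branches inside the loop by a generic one-pass key=value table (dict) populate followed by two .get lookups.
import Mathlib
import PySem

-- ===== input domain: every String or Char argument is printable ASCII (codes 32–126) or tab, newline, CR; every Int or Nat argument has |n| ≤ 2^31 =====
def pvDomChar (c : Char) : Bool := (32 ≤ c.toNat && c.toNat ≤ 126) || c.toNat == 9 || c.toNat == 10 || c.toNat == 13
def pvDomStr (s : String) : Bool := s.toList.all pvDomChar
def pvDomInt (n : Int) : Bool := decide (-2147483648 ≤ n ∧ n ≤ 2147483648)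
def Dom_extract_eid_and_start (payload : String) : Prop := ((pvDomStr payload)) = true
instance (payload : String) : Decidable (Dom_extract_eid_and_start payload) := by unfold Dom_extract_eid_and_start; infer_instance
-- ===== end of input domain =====

-- B replaces A's per-key branches inside the loop by one generic key=value table built in one pass,
-- followed by two lookups (objective: idiomatic; same cost).

-- ===== PORT A =====
-- one loop iteration of A: update (eid, start) from one ';'-separated part
def pvAStep (st : Option String × Option String) (part : String) : Option String × Option String :=
  if PySem.Str.startswith part "eid=" then
    -- part.split("=")[1]; startswith guarantees pyGet? returns some, and eid is Optional
    (PySem.List.pyGet? ((PySem.Chars.splitOn part.toList "=".toList).map String.ofList) 1, st.2)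
  else if PySem.Str.startswith part "start=" then
    (st.1, PySem.List.pyGet? ((PySem.Chars.splitOn part.toList "=".toList).map String.ofList) 1)
  else st

def extract_eid_and_start (payload : String) : Option String × Option String :=
  ((PySem.Chars.splitOn payload.toList ";".toList).map String.ofList).foldl pvAStep (none, none)

-- ===== PORT B =====
-- one loop iteration of B: if part splits into at least two pieces, record pieces[0] ↦ pieces[1]
def pvBStep (d : PySem.Dict String String) (part : String) : PySem.Dict String String :=
  match (PySem.Chars.splitOn part.toList "=".toList).map String.ofList with
  | k :: v :: _ => d.insert k v
  | _ => d

def extract_eid_and_start_alt (payload : String) : Option String × Option String :=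
  let fields := ((PySem.Chars.splitOn payload.toList ";".toList).map String.ofList).foldl pvBStep PySem.Dict.empty
  (fields.get? "eid", fields.get? "start")

-- ===== PRECONDITION & SPEC =====
def Spec_extract_eid_and_start (payload : String) (out : Option String × Option String) : Prop := out = extract_eid_and_start_alt payload
instance (payload : String) (out : Option String × Option String) : Decidable (Spec_extract_eid_and_start payload out) := by unfold Spec_extract_eid_and_start; infer_instance

-- ===== CLAIM (what is proved, stated in full; the proofs are below) =====
def Claim_equal_extract_eid_and_start : Prop := ∀ (payload : String), Dom_extract_eid_and_start payload → Spec_extract_eid_and_start payload (extract_eid_and_start payload)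

-- ===== LEMMAS AND PROOFS =====

-- structural reference version of splitting on '=' (proof device only)
def pvSplitEq : List Char → List (List Char)
  | [] => [[]]
  | c :: rest =>
    if c = '=' then [] :: pvSplitEq rest
    else
      match pvSplitEq rest with
      | p :: ps => (c :: p) :: ps
      | [] => [[c]]

theorem pvSplitEq_ne_nil (cs : List Char) : pvSplitEq cs ≠ [] := by
  cases cs with
  | nil => simp [pvSplitEq]
  | cons c rest =>
    simp only [pvSplitEq]
    split_ifs
    · simp
    · cases h : pvSplitEq rest <;> simp

theorem pvGo_spec (fuel : Nat) : ∀ (l cur : List Char) (acc : List (List Char)), l.length ≤ fuel →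
    PySem.Chars.splitOn.go ['='] fuel l cur acc
      = acc.reverse ++ (cur.reverse ++ (pvSplitEq l).headI) :: (pvSplitEq l).tail := by
  induction fuel with
  | zero =>
    intro l cur acc h
    have : l = [] := by cases l <;> simp_all
    subst this
    simp [PySem.Chars.splitOn.go, pvSplitEq]
  | succ f ih =>
    intro l cur acc h
    cases l with
    | nil => simp [PySem.Chars.splitOn.go, pvSplitEq]
    | cons c rest =>
      simp only [PySem.Chars.splitOn.go, List.isPrefixOf]
      have hlen : rest.length ≤ f := by simpa using Nat.le_of_succ_le_succ h
      rcases eq_or_ne c '=' with hc | hc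
      · subst hc
        rw [if_pos (by simp : (('=' == '=') && true) = true)]
        have hdrop : List.drop ['='].length ('=' :: rest) = rest := by simp
        rw [hdrop, ih _ _ _ hlen]
        cases hr : pvSplitEq rest with
        | nil => exact absurd hr (pvSplitEq_ne_nil rest)
        | cons p ps => simp [pvSplitEq, hr]
      · rw [if_neg (by simp [Ne.symm hc] : ¬ (('=' == c) && true) = true)]
        rw [ih _ _ _ hlen]
        cases hr : pvSplitEq rest with
        | nil => exact absurd hr (pvSplitEq_ne_nil rest)
        | cons p ps => simp [pvSplitEq, hc, hr]

theorem pvSplitOn_eq (cs : List Char) : PySem.Chars.splitOn cs ['='] = pvSplitEq cs := by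
  unfold PySem.Chars.splitOn
  rw [pvGo_spec _ _ _ _ (by omega)]
  cases h : pvSplitEq cs with
  | nil => exact absurd h (pvSplitEq_ne_nil cs)
  | cons p ps => simp

-- A's branch condition characterised by B's split shape
theorem pvKeyMatch (key : List Char) (hk : '=' ∉ key) : ∀ cs : List Char,
    ((key ++ ['=']).isPrefixOf cs = true ↔ ∃ v rest, pvSplitEq cs = key :: v :: rest) := by
  induction key with
  | nil =>
    intro cs
    cases cs with
    | nil => simp [pvSplitEq]
    | cons c rest =>
      simp only [List.nil_append, List.isPrefixOf, Bool.and_true, pvSplitEq]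
      by_cases hc : c = '='
      · subst hc
        simp only [beq_self_eq_true, if_pos, true_iff]
        cases hr : pvSplitEq rest with
        | nil => exact absurd hr (pvSplitEq_ne_nil rest)
        | cons p ps => exact ⟨p, ps, by simp⟩
      · simp only [if_neg hc, beq_iff_eq]
        constructor
        · intro h; exact absurd h.symm hc
        · rintro ⟨v, r, hvr⟩
          cases hp : pvSplitEq rest with
          | nil => exact absurd hp (pvSplitEq_ne_nil rest)
          | cons p ps => rw [hp] at hvr; simp at hvr
  | cons k ks ih =>
    intro cs
    have hk1 : k ≠ '=' := fun h => hk (by simp [h])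
    have hk2 : '=' ∉ ks := fun h => hk (by simp [h])
    cases cs with
    | nil => simp [pvSplitEq]
    | cons c rest =>
      simp only [List.cons_append, List.isPrefixOf, pvSplitEq]
      by_cases hc : c = '='
      · subst hc
        simp only [if_pos]
        constructor
        · intro h
          have : k = '=' := by
            have := (Bool.and_eq_true _ _).mp h
            exact (beq_iff_eq.mp this.1)
          exact absurd this hk1
        · rintro ⟨v, r, hvr⟩; simp at hvr
      · rw [if_neg hc]
        cases hr : pvSplitEq rest with
        | nil => exact absurd hr (pvSplitEq_ne_nil rest)
        | cons p ps =>
          simp only [Bool.and_eq_true, beq_iff_eq]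
          constructor
          · rintro ⟨hkc, hpre⟩
            obtain ⟨v, r, hvr⟩ := (ih hk2 rest).mp hpre
            rw [hr] at hvr
            cases hvr
            exact ⟨v, r, by simp [hkc.symm]⟩
          · rintro ⟨v, r, hvr⟩
            simp only [List.cons.injEq] at hvr
            obtain ⟨⟨hck, hpk⟩, hps⟩ := hvr
            refine ⟨hck.symm, (ih hk2 rest).mpr ⟨v, r, ?_⟩⟩
            rw [hr, hpk, hps]

theorem pvStep_inv (d : PySem.Dict String String) (part : String) :
    ((pvBStep d part).get? "eid", (pvBStep d part).get? "start")
      = pvAStep (d.get? "eid", d.get? "start") part := by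
  have heid : PySem.Str.startswith part "eid=" = true
      ↔ ∃ v rest, pvSplitEq part.toList = ['e', 'i', 'd'] :: v :: rest := by
    rw [PySem.Str.startswith_eq]
    exact pvKeyMatch ['e', 'i', 'd'] (by decide) part.toList
  have hstart : PySem.Str.startswith part "start=" = true
      ↔ ∃ v rest, pvSplitEq part.toList = ['s', 't', 'a', 'r', 't'] :: v :: rest := by
    rw [PySem.Str.startswith_eq]
    exact pvKeyMatch ['s', 't', 'a', 'r', 't'] (by decide) part.toList
  unfold pvAStep pvBStep
  rw [show ("=" : String).toList = ['='] from rfl, pvSplitOn_eq]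
  cases hsp : pvSplitEq part.toList with
  | nil => exact absurd hsp (pvSplitEq_ne_nil _)
  | cons p ps =>
    cases ps with
    | nil =>
      have h1 : ¬ PySem.Str.startswith part "eid=" = true := by
        rw [heid]; rintro ⟨v, r, hh⟩; rw [hsp] at hh; simp at hh
      have h2 : ¬ PySem.Str.startswith part "start=" = true := by
        rw [hstart]; rintro ⟨v, r, hh⟩; rw [hsp] at hh; simp at hh
      rw [if_neg h1, if_neg h2]
      rfl
    | cons v rest =>
      simp only [List.map_cons]
      by_cases hp : p = ['e', 'i', 'd']
      · have h1 : PySem.Str.startswith part "eid=" = true :=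
          heid.mpr ⟨v, rest, by rw [hsp, hp]⟩
        rw [if_pos h1]
        subst hp
        rw [show String.ofList ['e', 'i', 'd'] = "eid" from rfl]
        simp [PySem.List.pyGet?, PySem.List.pyIdx?, PySem.Dict.get?_insert_self,
          PySem.Dict.get?_insert_of_ne d (String.ofList v)
            (show ("start" : String) ≠ "eid" by decide)]
      · by_cases hq : p = ['s', 't', 'a', 'r', 't']
        · have h2 : PySem.Str.startswith part "start=" = true :=
            hstart.mpr ⟨v, rest, by rw [hsp, hq]⟩
          have h1 : ¬ PySem.Str.startswith part "eid=" = true := by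
            rw [heid]; rintro ⟨v', r', hh⟩; rw [hsp] at hh
            simp only [List.cons.injEq] at hh
            exact hp hh.1
          rw [if_neg h1, if_pos h2]
          subst hq
          rw [show String.ofList ['s', 't', 'a', 'r', 't'] = "start" from rfl]
          simp [PySem.List.pyGet?, PySem.List.pyIdx?, PySem.Dict.get?_insert_self,
            PySem.Dict.get?_insert_of_ne d (String.ofList v)
              (show ("eid" : String) ≠ "start" by decide)]
        · have h1 : ¬ PySem.Str.startswith part "eid=" = true := by
            rw [heid]; rintro ⟨v', r', hh⟩; rw [hsp] at hh
            simp only [List.cons.injEq] at hh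
            exact hp hh.1
          have h2 : ¬ PySem.Str.startswith part "start=" = true := by
            rw [hstart]; rintro ⟨v', r', hh⟩; rw [hsp] at hh
            simp only [List.cons.injEq] at hh
            exact hq hh.1
          have hne1 : ("eid" : String) ≠ String.ofList p := by
            intro hh
            apply hp
            have h3 : String.ofList p = String.ofList ['e', 'i', 'd'] := hh.symm
            simpa [String.toList_ofList] using congrArg String.toList h3
          have hne2 : ("start" : String) ≠ String.ofList p := by
            intro hh
            apply hq
            have h3 : String.ofList p = String.ofList ['s', 't', 'a', 'r', 't'] := hh.symm
            simpa [String.toList_ofList] using congrArg String.toList h3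
          rw [if_neg h1, if_neg h2]
          simp [PySem.Dict.get?_insert_of_ne d (String.ofList v) hne1,
            PySem.Dict.get?_insert_of_ne d (String.ofList v) hne2]

-- loop invariant: A's pair is B's dictionary seen through the two lookups
theorem pvFold_inv (parts : List String) : ∀ d : PySem.Dict String String,
    ((parts.foldl pvBStep d).get? "eid", (parts.foldl pvBStep d).get? "start")
      = parts.foldl pvAStep (d.get? "eid", d.get? "start") := by
  induction parts with
  | nil => intro d; rfl
  | cons part ps ih =>
    intro d
    simp only [List.foldl_cons]
    rw [ih (pvBStep d part), pvStep_inv]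

-- ===== VERDICT (by name: the statement is the Claim_ definition above) =====
theorem extract_eid_and_start_spec : Claim_equal_extract_eid_and_start := by
  intro payload _
  unfold Spec_extract_eid_and_start extract_eid_and_start extract_eid_and_start_alt
  have h := pvFold_inv ((PySem.Chars.splitOn payload.toList ";".toList).map String.ofList)
    PySem.Dict.empty
  rw [PySem.Dict.get?_empty, PySem.Dict.get?_empty] at h
  exact h.symm
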